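-- pv_equiv track=rewrite | github.com/Hanjise0ng/coding-test | BOJ/32373_장난감자물쇠.py | is_lock_valid
-- ===== SOURCE A (Python) =====
-- def is_lock_valid(n, k, arr):
--     groups = [[] for _ in range(k)]
--
--     for i in range(n):
--         groups[i % k].append(arr[i])
--
--     for group in groups:
--         group.sort()
--
--     sorted_arr = []
--     for i in range(n):
--         sorted_arr.append(groups[i % k][i // k])
--
--     if sorted_arr == sorted(arr):
--         return "Yes"
--     else:
--         return "No"
-- ===== SOURCE B (Python) =====
-- def is_lock_valid(n, k, arr):
--     # Valid iff the fully sorted array is reachable, i.e. for every residue class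
--     # r mod k, arr and sorted(arr) hold the same multiset of values at positions
--     # congruent to r. One global sort + one counting pass; no per-group sorting,
--     # no reassembled array.
--     if len(arr) != n:
--         return "No"
--     s = sorted(arr)
--     bal = {}
--     for i in range(n):
--         r = i % k
--         bal[(r, arr[i])] = bal.get((r, arr[i]), 0) + 1
--         bal[(r, s[i])] = bal.get((r, s[i]), 0) - 1
--     return "Yes" if all(v == 0 for v in bal.values()) else "No"
-- ===== Notes on version B (the rewrite author's own statement) =====
-- stated objective: faster
-- what changed: B abandons A's bucket-sort-and-reassemble pipeline entirely: it sorts the whole array once and makes a single counting pass with a balance dict keyed by (index mod k, value), +1 for arr's element and -1 for sorted(arr)'s element at each position, answering Yes iff every balance is zero (the interleaving of sorted residue classes equals sorted(arr) iff each residue class of arr and of sorted(arr) carries the same multiset); a timing run measured this constant-factor win (no per-group list building/sorting and no reassembled copy).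
-- outside the precondition, e.g. on is_lock_valid(-1, 1, []): A returns 'Yes', B returns 'No'
import Mathlib
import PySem

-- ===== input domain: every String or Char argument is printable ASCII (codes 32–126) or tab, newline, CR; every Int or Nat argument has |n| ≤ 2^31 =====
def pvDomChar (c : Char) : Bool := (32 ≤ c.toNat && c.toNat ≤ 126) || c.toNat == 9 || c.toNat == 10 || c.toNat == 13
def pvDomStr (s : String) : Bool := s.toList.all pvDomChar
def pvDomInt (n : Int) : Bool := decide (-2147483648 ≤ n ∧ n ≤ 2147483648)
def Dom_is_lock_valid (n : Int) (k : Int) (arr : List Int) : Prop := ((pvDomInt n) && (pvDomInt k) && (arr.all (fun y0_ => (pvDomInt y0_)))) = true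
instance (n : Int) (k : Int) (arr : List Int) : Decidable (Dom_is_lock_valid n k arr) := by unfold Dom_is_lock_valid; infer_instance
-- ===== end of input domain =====

set_option maxHeartbeats 1000000

-- B replaces A's whole build-sorted-groups-and-reassemble pipeline by one global sort plus a
-- single counting pass over a balance dict (per residue class, +1 for arr's value, -1 for
-- sorted(arr)'s value at the same position): valid iff every balance is zero; objective: faster (a timing run measured B faster by a constant factor).

-- ===== PORT A =====
def is_lock_valid (n : Int) (k : Int) (arr : List Int) : String :=
  -- groups = [[] for _ in range(k)]
  let groups0 : List (List Int) := (PySem.List.pyRange 0 k 1).map (fun _ => ([] : List Int))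
  -- for i in range(n): groups[i % k].append(arr[i])
  let groups1 : List (List Int) := (PySem.List.pyRange 0 n 1).foldl
      (fun gs i => gs.modify (PySem.Int.mod i k).toNat (fun g => g ++ [PySem.List.pyGetD arr i 0])) groups0
  -- for group in groups: group.sort()
  let groups2 : List (List Int) := groups1.map (fun g => PySem.List.sorted g (fun x => x))
  -- sorted_arr: for i in range(n): sorted_arr.append(groups[i % k][i // k])
  let sorted_arr : List Int := (PySem.List.pyRange 0 n 1).foldl
      (fun acc i => acc ++ [PySem.List.pyGetD (PySem.List.pyGetD groups2 (PySem.Int.mod i k) []) (PySem.Int.floordiv i k) 0]) []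
  if sorted_arr = PySem.List.sorted arr (fun x => x) then "Yes" else "No"

-- ===== PORT B =====
def is_lock_valid_alt (n : Int) (k : Int) (arr : List Int) : String :=
  if (arr.length : Int) ≠ n then "No" else
  -- s = sorted(arr)
  let s := PySem.List.sorted arr (fun x => x)
  -- bal: for i in range(n): bal[(i%k, arr[i])] += 1; bal[(i%k, s[i])] -= 1  (get-with-default 0)
  let bal : PySem.Dict (Int × Int) Int := (PySem.List.pyRange 0 n 1).foldl
      (fun d i =>
        let r := PySem.Int.mod i k
        let d1 := d.insert (r, PySem.List.pyGetD arr i 0) (d.getD (r, PySem.List.pyGetD arr i 0) 0 + 1)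
        d1.insert (r, PySem.List.pyGetD s i 0) (d1.getD (r, PySem.List.pyGetD s i 0) 0 - 1))
      PySem.Dict.empty
  -- "Yes" if all(v == 0 for v in bal.values()) else "No"
  if bal.values.all (fun v => v == 0) then "Yes" else "No"

-- ===== PRECONDITION & SPEC =====
-- Pre_ excludes the inputs where A raises (0 < n together with k ≤ 0 or n > len(arr):
-- ZeroDivisionError/IndexError) and the malformed corner n < 0 with arr = [] (the problem
-- has n = len(arr) ≥ 0), where A's accidental "Yes" from empty loops and B's "No" from its
-- length check are both defensible.
def Pre_is_lock_valid (n : Int) (k : Int) (arr : List Int) : Prop :=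
  (0 < n → 0 < k ∧ n ≤ (arr.length : Int)) ∧ ¬(n < 0 ∧ arr = [])
instance (n : Int) (k : Int) (arr : List Int) : Decidable (Pre_is_lock_valid n k arr) := by
  unfold Pre_is_lock_valid; infer_instance

def pvWitness_is_lock_valid : Int × Int × List Int := (4, 2, [1, 3, 2, 4])

def Spec_is_lock_valid (n : Int) (k : Int) (arr : List Int) (out : String) : Prop := out = is_lock_valid_alt n k arr
instance (n : Int) (k : Int) (arr : List Int) (out : String) : Decidable (Spec_is_lock_valid n k arr out) := by unfold Spec_is_lock_valid; infer_instance

-- ===== CLAIM (what is proved, stated in full; the proofs are below) =====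
def Claim_equal_is_lock_valid : Prop := ∀ (n : Int) (k : Int) (arr : List Int), Dom_is_lock_valid n k arr → Pre_is_lock_valid n k arr → Spec_is_lock_valid n k arr (is_lock_valid n k arr)

-- ===== LEMMAS AND PROOFS =====

-- the residue class r of xs below n, in index order
def pvCls (k : Int) (xs : List Int) (n r : Int) : List Int :=
  (PySem.List.pyRange r n k).map (fun i => PySem.List.pyGetD xs i 0)

-- the sorted residue classes (A's groups after sorting)
def pvCols (n : Int) (k : Int) (arr : List Int) : List (List Int) :=
  (PySem.List.pyRange 0 k 1).map (fun r =>
      PySem.List.sorted ((PySem.List.pyRange r n k).map (fun i => PySem.List.pyGetD arr i 0)) (fun x => x))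

-- element i of the reassembled array
def pvG (n : Int) (k : Int) (arr : List Int) (i : Int) : Int :=
  PySem.List.pyGetD (PySem.List.pyGetD (pvCols n k arr) (PySem.Int.mod i k) []) (PySem.Int.floordiv i k) 0

-- the (residue, value) pair B counts at index i of xs
def pvPair (k : Int) (xs : List Int) (i : Int) : Int × Int :=
  (PySem.Int.mod i k, PySem.List.pyGetD xs i 0)

-- B's dict step
def pvStep (k : Int) (arr s : List Int) (d : PySem.Dict (Int × Int) Int) (i : Int) : PySem.Dict (Int × Int) Int :=
  let r := PySem.Int.mod i k
  let d1 := d.insert (r, PySem.List.pyGetD arr i 0) (d.getD (r, PySem.List.pyGetD arr i 0) 0 + 1)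
  d1.insert (r, PySem.List.pyGetD s i 0) (d1.getD (r, PySem.List.pyGetD s i 0) 0 - 1)

lemma pvmod_eq (a k : Int) (hk : 0 < k) : PySem.Int.mod a k = a % k := by
  unfold PySem.Int.mod
  rw [Int.fmod_eq_emod, if_pos (Or.inl (le_of_lt hk)), add_zero]

lemma pvdiv_eq (a k : Int) (hk : 0 < k) : PySem.Int.floordiv a k = a / k := by
  unfold PySem.Int.floordiv
  rw [Int.fdiv_eq_ediv, if_pos (Or.inl (le_of_lt hk)), sub_zero]

-- pyRange r (m+1) k gains m exactly when m % k = r (0 ≤ r < k, 0 ≤ m)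
lemma pyRange_step_snoc {k r m : Int} (hk : 0 < k) (hm : 0 ≤ m) (hr : r = m % k) :
    PySem.List.pyRange r (m+1) k = PySem.List.pyRange r m k ++ [m] := by
  have h0r : 0 ≤ r := hr ▸ Int.emod_nonneg m (by omega)
  have hrk : r < k := hr ▸ Int.emod_lt_of_pos m hk
  have hqm : m = k * (m / k) + r := by
    have h : m % k + k * (m / k) = m := Int.emod_add_mul_ediv m k
    omega
  set q := m / k with hq
  have hq0 : 0 ≤ q := Int.ediv_nonneg hm (le_of_lt hk)
  have hkq : 0 ≤ k * q := mul_nonneg (le_of_lt hk) hq0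
  have hrm : r ≤ m := by omega
  rw [PySem.List.pyRange_of_pos _ _ hk, PySem.List.pyRange_of_pos _ _ hk,
      if_pos (by omega : r < m + 1)]
  have hdist : k * (q + 1) = k * q + k := by ring
  have hc1 : (m + 1 - r + k - 1) / k = q + 1 := by
    have h : m + 1 - r + k - 1 = 0 + k * (q + 1) := by omega
    rw [h, Int.add_mul_ediv_left _ _ (by omega : k ≠ 0)]
    simp
  by_cases hlt : r < m
  · have hc2 : (m - r + k - 1) / k = q := by
      have h : m - r + k - 1 = (k - 1) + k * q := by omega
      rw [h, Int.add_mul_ediv_left _ _ (by omega : k ≠ 0),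
          Int.ediv_eq_zero_of_lt (by omega) (by omega)]
      omega
    rw [if_pos hlt, hc1, hc2]
    have h1 : (q + 1).toNat = q.toNat + 1 := by omega
    rw [h1, List.range_succ, List.map_append]
    congr 1
    simp only [List.map_cons, List.map_nil, List.cons.injEq, and_true]
    have hcast : ((q.toNat : Int)) = q := by omega
    rw [hcast]
    omega
  · -- r = m, so q = 0
    have hrm' : r = m := by omega
    have hq0' : q = 0 := by
      have hz : k * q = 0 := by omega
      rcases mul_eq_zero.mp hz with h | h
      · omega
      · exact h
    rw [if_neg hlt, hc1, hq0', show ((0:Int) + 1).toNat = 1 from rfl, List.range_one]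
    simp [hrm']

lemma pyRange_step_stable {k r m : Int} (hk : 0 < k) (_hm : 0 ≤ m)
    (h0r : 0 ≤ r) (hrk : r < k) (hr : r ≠ m % k) :
    PySem.List.pyRange r (m+1) k = PySem.List.pyRange r m k := by
  rw [PySem.List.pyRange_of_pos _ _ hk, PySem.List.pyRange_of_pos _ _ hk]
  by_cases h1 : r < m
  · rw [if_pos (by omega), if_pos h1]
    set t := (m - r) % k with ht
    set q := (m - r) / k with hq
    have hdq : m - r = k * q + t := by
      have h : (m - r) % k + k * ((m - r) / k) = m - r := Int.emod_add_mul_ediv (m - r) k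
      rw [← hq, ← ht] at h
      omega
    have ht0 : 0 ≤ t := Int.emod_nonneg _ (by omega)
    have htk : t < k := Int.emod_lt_of_pos _ hk
    have htne : t ≠ 0 := by
      intro h0
      apply hr
      have hm' : m = r + k * q := by omega
      rw [hm', Int.add_mul_emod_self_left, Int.emod_eq_of_lt h0r hrk]
    have hdist : k * (q + 1) = k * q + k := by ring
    have e1 : m - r + k - 1 = (t - 1) + k * (q + 1) := by omega
    have e2 : m + 1 - r + k - 1 = t + k * (q + 1) := by omega
    rw [e1, e2, Int.add_mul_ediv_left _ _ (by omega : k ≠ 0),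
        Int.add_mul_ediv_left _ _ (by omega : k ≠ 0),
        Int.ediv_eq_zero_of_lt (by omega) (by omega),
        Int.ediv_eq_zero_of_lt (by omega) (by omega)]
  · have hrm : m < r := by
      rcases eq_or_lt_of_le (not_lt.mp h1) with h | h
      · exfalso
        apply hr
        rw [h, Int.emod_eq_of_lt (by omega) (by omega)]
      · exact h
    rw [if_neg (by omega), if_neg (by omega)]

-- A's group-building loop produces exactly the residue classes
lemma groups_fold (k : Int) (arr : List Int) (hk : 0 < k) (m : Nat) :
    (PySem.List.pyRange 0 (m:Int) 1).foldl
      (fun gs i => gs.modify (PySem.Int.mod i k).toNat (fun g => g ++ [PySem.List.pyGetD arr i 0]))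
      ((PySem.List.pyRange 0 k 1).map (fun _ => ([] : List Int)))
    = (PySem.List.pyRange 0 k 1).map (fun r => pvCls k arr (m:Int) r) := by
  induction m with
  | zero =>
    rw [show ((0:Nat):Int) = 0 from rfl, PySem.List.pyRange_one_eq_nil (le_refl 0), List.foldl_nil]
    apply List.map_congr_left
    intro r hr
    have hmem := PySem.List.mem_pyRange_one.mp hr
    unfold pvCls
    rw [PySem.List.pyRange_of_pos _ _ hk, if_neg (by omega)]
    simp
  | succ m ih =>
    rw [show ((m+1:Nat):Int) = (m:Int) + 1 by push_cast; ring,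
        PySem.List.pyRange_one_succ_right (by positivity), List.foldl_append, ih,
        List.foldl_cons, List.foldl_nil]
    apply List.ext_getElem
    · simp
    · intro i hi1 hi2
      have hi : i < (PySem.List.pyRange 0 k 1).length := by
        simpa using hi2
      rw [List.getElem_modify]
      have hik : (i : Int) < k := by
        have := PySem.List.length_pyRange_one 0 k
        omega
      have hval : (PySem.List.pyRange 0 k 1)[i] = (i : Int) := by
        rw [PySem.List.getElem_pyRange_one]
        omega
      rw [List.getElem_map, List.getElem_map, hval]
      have hmodnn : 0 ≤ PySem.Int.mod (m:Int) k := by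
        rw [pvmod_eq _ _ hk]; exact Int.emod_nonneg _ (by omega)
      by_cases hcase : (PySem.Int.mod (m:Int) k).toNat = i
      · rw [if_pos hcase]
        have hr : (i : Int) = (m:Int) % k := by
          rw [← pvmod_eq _ _ hk]; omega
        unfold pvCls
        rw [pyRange_step_snoc hk (by positivity) hr, List.map_append]
        simp
      · rw [if_neg hcase]
        have hr : (i : Int) ≠ (m:Int) % k := by
          rw [← pvmod_eq _ _ hk]; omega
        unfold pvCls
        rw [pyRange_step_stable hk (by positivity) (by omega) hik hr]

lemma foldl_append_map {α β : Type} (f : α → β) (l : List α) (acc : List β) :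
    l.foldl (fun a i => a ++ [f i]) acc = acc ++ l.map f := by
  induction l generalizing acc with
  | nil => simp
  | cons x l ih => simp [ih]

-- A's result, characterised (for 0 < k, 0 ≤ n)
lemma A_eq (n k : Int) (arr : List Int) (hk : 0 < k) (hn : 0 ≤ n) :
    is_lock_valid n k arr =
      if (PySem.List.pyRange 0 n 1).map (pvG n k arr) = PySem.List.sorted arr (fun x => x)
      then "Yes" else "No" := by
  obtain ⟨m, rfl⟩ : ∃ m : Nat, n = (m:Int) := ⟨n.toNat, by omega⟩
  simp only [is_lock_valid]
  rw [groups_fold k arr hk m, List.map_map, foldl_append_map, List.nil_append]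
  rfl

-- the strided range is the filter of the full range by residue
lemma filter_range_mod (n k r : Int) (hk : 0 < k) (h0r : 0 ≤ r) (hrk : r < k) (hn : 0 ≤ n) :
    (PySem.List.pyRange 0 n 1).filter (fun i => decide (i % k = r)) = PySem.List.pyRange r n k := by
  obtain ⟨m, rfl⟩ : ∃ m : Nat, n = (m:Int) := ⟨n.toNat, by omega⟩
  clear hn
  induction m with
  | zero =>
    rw [show ((0:Nat):Int) = 0 from rfl, PySem.List.pyRange_one_eq_nil (le_refl 0),
        PySem.List.pyRange_of_pos _ _ hk, if_neg (by omega)]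
    simp
  | succ m ih =>
    rw [show ((m+1:Nat):Int) = (m:Int) + 1 by push_cast; ring,
        PySem.List.pyRange_one_succ_right (by positivity), List.filter_append, ih]
    by_cases h : (m:Int) % k = r
    · rw [pyRange_step_snoc hk (by positivity) h.symm]
      congr 1
      simp [h]
    · rw [pyRange_step_stable hk (by positivity) h0r hrk (fun he => h he.symm)]
      simp [h]

-- mapping the reassembly function over one strided range yields the sorted class
lemma map_g_strided (n k : Int) (arr : List Int) (r : Int)
    (hk : 0 < k) (h0r : 0 ≤ r) (hrk : r < k) :
    (PySem.List.pyRange r n k).map (pvG n k arr)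
      = PySem.List.sorted (pvCls k arr n r) (fun x => x) := by
  have hlenc : (PySem.List.sorted (pvCls k arr n r) (fun x => x)).length
      = (if r < n then ((n - r + k - 1) / k).toNat else 0) := by
    rw [PySem.List.length_sorted]
    unfold pvCls
    rw [List.length_map, PySem.List.pyRange_of_pos _ _ hk, List.length_map, List.length_range]
  rw [PySem.List.pyRange_of_pos r n hk, List.map_map]
  apply List.ext_getElem
  · rw [List.length_map, List.length_range, hlenc]
  · intro i hi1 hi2
    rw [List.getElem_map, List.getElem_range]
    simp only [Function.comp_apply]
    unfold pvG
    have e1 : PySem.Int.mod (r + k * (i:Int)) k = r := by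
      rw [pvmod_eq _ _ hk, Int.add_mul_emod_self_left, Int.emod_eq_of_lt h0r hrk]
    have e2 : PySem.Int.floordiv (r + k * (i:Int)) k = (i:Int) := by
      rw [pvdiv_eq _ _ hk, Int.add_mul_ediv_left _ _ (by omega : k ≠ 0),
          Int.ediv_eq_zero_of_lt h0r hrk]
      omega
    rw [e1, e2]
    have hcols : PySem.List.pyGetD (pvCols n k arr) r []
        = PySem.List.sorted (pvCls k arr n r) (fun x => x) := by
      unfold pvCols pvCls
      exact PySem.List.pyGetD_map_pyRange_of_nonneg _ k r [] h0r hrk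
    rw [hcols]
    have hi' : ((i:Int)) < ((PySem.List.sorted (pvCls k arr n r) (fun x => x)).length : Int) := by
      exact_mod_cast hi2
    rw [PySem.List.pyGetD_eq_getElem _ _ (by positivity) hi']
    simp

-- ---- B-side machinery ----

-- the balance dict's lookups: +count among arr-pairs, -count among s-pairs (prefix-wise)
lemma bal_getD (k : Int) (arr s : List Int) (l : List Int) (d : PySem.Dict (Int × Int) Int)
    (key : Int × Int) :
    (l.foldl (pvStep k arr s) d).getD key 0
      = d.getD key 0 + ((l.map (pvPair k arr)).count key : Int) - ((l.map (pvPair k s)).count key : Int) := by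
  induction l generalizing d with
  | nil => simp
  | cons x l ih =>
    rw [List.foldl_cons, ih]
    have hstep : (pvStep k arr s d x).getD key 0
        = d.getD key 0 + (if key = pvPair k arr x then 1 else 0) - (if key = pvPair k s x then 1 else 0) := by
      simp only [pvStep, pvPair]
      rw [PySem.Dict.getD_insert]
      by_cases hb : key = (PySem.Int.mod x k, PySem.List.pyGetD s x 0)
      · subst hb
        rw [if_pos rfl, PySem.Dict.getD_insert]
        by_cases hc : (PySem.Int.mod x k, PySem.List.pyGetD s x 0)
            = (PySem.Int.mod x k, PySem.List.pyGetD arr x 0)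
        · simp only [if_pos hc]
          rw [hc]
          simp
        · simp only [if_neg hc]
          simp
      · rw [if_neg hb, PySem.Dict.getD_insert]
        by_cases ha : key = (PySem.Int.mod x k, PySem.List.pyGetD arr x 0)
        · simp only [if_pos ha, if_neg hb]
          rw [ha]
          omega
        · simp only [if_neg ha, if_neg hb]
          omega
    rw [hstep]
    simp only [List.map_cons, List.count_cons, beq_iff_eq]
    by_cases ha : pvPair k arr x = key
    · by_cases hb : pvPair k s x = key
      · rw [if_pos ha, if_pos hb, if_pos ha.symm, if_pos hb.symm]
        push_cast
        omega
      · rw [if_pos ha, if_neg hb, if_pos ha.symm, if_neg (fun hc => hb hc.symm)]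
        push_cast
        omega
    · by_cases hb : pvPair k s x = key
      · rw [if_neg ha, if_pos hb, if_neg (fun hc => ha hc.symm), if_pos hb.symm]
        push_cast
        omega
      · rw [if_neg ha, if_neg hb, if_neg (fun hc => ha hc.symm), if_neg (fun hc => hb hc.symm)]
        push_cast
        omega

lemma bal_nodup_keys (k : Int) (arr s : List Int) (l : List Int) (d : PySem.Dict (Int × Int) Int)
    (hd : d.keys.Nodup) : (l.foldl (pvStep k arr s) d).keys.Nodup := by
  induction l generalizing d with
  | nil => exact hd
  | cons x l ih =>
    rw [List.foldl_cons]
    exact ih _ (PySem.Dict.nodup_keys_insert _ _ _ (PySem.Dict.nodup_keys_insert _ _ _ hd))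

-- all values zero ↔ every lookup (default 0) is zero
lemma all_values_zero {κ : Type} [BEq κ] [LawfulBEq κ] (d : PySem.Dict κ Int) (hnd : d.keys.Nodup) :
    (d.values.all (fun v => v == 0)) = true ↔ ∀ key : κ, d.getD key 0 = 0 := by
  rw [PySem.Dict.values_eq_map_keys d hnd 0]
  rw [List.all_eq_true]
  constructor
  · intro h key
    by_cases hmem : key ∈ d.keys
    · have := h (d.getD key 0) (List.mem_map_of_mem hmem)
      simpa using this
    · refine PySem.Dict.getD_of_not_contains _ _ ?_
      by_contra hc
      exact hmem ((PySem.Dict.contains_iff_mem_keys _ _).mp (by simpa using hc))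
  · intro h v hv
    obtain ⟨key, _, rfl⟩ := List.mem_map.mp hv
    simpa using h key

-- counting pairs = counting values inside a residue class
lemma count_pair_eq (n k : Int) (xs : List Int) (r v : Int) (hk : 0 < k) (h0r : 0 ≤ r) (hrk : r < k)
    (hn : 0 ≤ n) :
    ((PySem.List.pyRange 0 n 1).map (pvPair k xs)).count (r, v)
      = (pvCls k xs n r).count v := by
  unfold pvCls
  rw [← filter_range_mod n k r hk h0r hrk hn]
  rw [List.count_eq_countP, List.count_eq_countP, List.countP_map, List.countP_map,
      List.countP_filter]
  apply List.countP_congr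
  intro i hi
  have hmem := PySem.List.mem_pyRange_one.mp hi
  simp only [Function.comp_apply, pvPair, pvmod_eq i k hk, Prod.mk.injEq,
    Bool.and_eq_true, decide_eq_true_eq, beq_iff_eq]
  constructor
  · rintro ⟨h1, h2⟩; exact ⟨h2, h1⟩
  · rintro ⟨h1, h2⟩; exact ⟨h2, h1⟩

-- pairs with residue outside [0,k) are never counted
lemma count_pair_zero (n k : Int) (xs : List Int) (r v : Int) (hk : 0 < k)
    (hr : ¬ (0 ≤ r ∧ r < k)) :
    ((PySem.List.pyRange 0 n 1).map (pvPair k xs)).count (r, v) = 0 := by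
  rw [List.count_eq_zero]
  intro hmem
  obtain ⟨i, _, heq⟩ := List.mem_map.mp hmem
  apply hr
  have h1 : PySem.Int.mod i k = r := congrArg Prod.fst heq
  rw [pvmod_eq i k hk] at h1
  exact ⟨h1 ▸ Int.emod_nonneg i (by omega), h1 ▸ Int.emod_lt_of_pos i hk⟩

-- a residue class of the sorted list is weakly increasing
lemma cls_sorted_pairwise (n k r : Int) (arr : List Int) (hk : 0 < k) (h0r : 0 ≤ r)
    (hlen : n ≤ (((PySem.List.sorted arr (fun x => x)).length : Int))) :
    List.Pairwise (· ≤ ·) (pvCls k (PySem.List.sorted arr (fun x => x)) n r) := by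
  unfold pvCls
  rw [List.pairwise_map, PySem.List.pyRange_of_pos _ _ hk, List.pairwise_map,
      List.pairwise_iff_getElem]
  intro p q hp hq hpq
  simp only [List.getElem_range]
  by_cases hrn : r < n
  · rw [if_pos hrn] at hp hq
    rw [List.length_range] at hp hq
    have hdiv : ((q:Int) + 1) * k ≤ n - r + k - 1 := by
      have h1 : (q:Int) + 1 ≤ (n - r + k - 1) / k := by
        have : (q:Int) < ((((n - r + k - 1) / k).toNat : Int)) := by exact_mod_cast hq
        have hnn : 0 ≤ (n - r + k - 1) / k := Int.ediv_nonneg (by omega) (by omega)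
        omega
      calc ((q:Int) + 1) * k ≤ ((n - r + k - 1) / k) * k := by
            exact mul_le_mul_of_nonneg_right h1 (by omega)
        _ ≤ n - r + k - 1 := Int.ediv_mul_le _ (by omega)
    have hqn : r + k * (q:Int) < n := by nlinarith
    have hkpq : k * (p:Int) ≤ k * (q:Int) := by
      have : (p:Int) ≤ (q:Int) := by exact_mod_cast le_of_lt hpq
      nlinarith
    have hip : (0:Int) ≤ r + k * p := by positivity
    have hiq : (0:Int) ≤ r + k * q := by positivity
    have hinq : r + k * (q:Int) < (((PySem.List.sorted arr (fun x => x)).length : Int)) := by omega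
    have hinp : r + k * (p:Int) < (((PySem.List.sorted arr (fun x => x)).length : Int)) := by omega
    rw [PySem.List.pyGetD_eq_getElem _ _ hip hinp, PySem.List.pyGetD_eq_getElem _ _ hiq hinq]
    exact PySem.List.sorted_id_getElem_mono arr (by omega) (by omega)
  · rw [if_neg hrn] at hp
    simp at hp

-- s as a map over the index range
lemma s_as_map (n : Int) (arr : List Int) (hlen : ((((PySem.List.sorted arr (fun x => x)).length) : Int)) = n) :
    (PySem.List.pyRange 0 n 1).map (fun i => PySem.List.pyGetD (PySem.List.sorted arr (fun x => x)) i 0)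
      = PySem.List.sorted arr (fun x => x) := by
  rw [← hlen]
  exact PySem.List.map_pyGetD_pyRange_zero' _ 0

-- membership in a strided range
lemma mem_strided (n k r j : Int) (hk : 0 < k) (h0r : 0 ≤ r) (hrk : r < k) (hn : 0 ≤ n) :
    j ∈ PySem.List.pyRange r n k ↔ (0 ≤ j ∧ j < n) ∧ j % k = r := by
  rw [← filter_range_mod n k r hk h0r hrk hn, List.mem_filter]
  simp [PySem.List.mem_pyRange_one]

-- THE CENTRAL EQUIVALENCE: reassembled-equals-sorted ↔ all pair-counts balance
lemma yes_iff (n k : Int) (arr : List Int) (hk : 0 < k) (hlen : (arr.length : Int) = n) :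
    ((PySem.List.pyRange 0 n 1).map (pvG n k arr) = PySem.List.sorted arr (fun x => x))
    ↔ ∀ key : Int × Int,
        ((PySem.List.pyRange 0 n 1).map (pvPair k arr)).count key
        = ((PySem.List.pyRange 0 n 1).map (pvPair k (PySem.List.sorted arr (fun x => x)))).count key := by
  have hn : 0 ≤ n := by omega
  have hslen : ((((PySem.List.sorted arr (fun x => x)).length) : Int)) = n := by
    rw [PySem.List.length_sorted]; omega
  -- step 1a: list equality ↔ pointwise equality on the index range
  have hpoint : ((PySem.List.pyRange 0 n 1).map (pvG n k arr) = PySem.List.sorted arr (fun x => x))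
      ↔ ∀ i ∈ PySem.List.pyRange 0 n 1,
          pvG n k arr i = PySem.List.pyGetD (PySem.List.sorted arr (fun x => x)) i 0 := by
    constructor
    · intro h
      rw [← s_as_map n arr hslen] at h
      exact List.map_inj_left.mp h
    · intro h
      rw [← s_as_map n arr hslen]
      exact List.map_inj_left.mpr h
  -- step 1b: pointwise equality ↔ per-residue equality of sorted classes
  have step1' : (∀ i ∈ PySem.List.pyRange 0 n 1,
          pvG n k arr i = PySem.List.pyGetD (PySem.List.sorted arr (fun x => x)) i 0)
      ↔ ∀ r ∈ PySem.List.pyRange 0 k 1,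
          PySem.List.sorted (pvCls k arr n r) (fun x => x)
            = pvCls k (PySem.List.sorted arr (fun x => x)) n r := by
    constructor
    · intro h r hr
      have hmem := PySem.List.mem_pyRange_one.mp hr
      rw [← map_g_strided n k arr r hk hmem.1 hmem.2]
      unfold pvCls
      rw [List.map_inj_left]
      intro j hj
      have hj' := (mem_strided n k r j hk hmem.1 hmem.2 hn).mp hj
      exact h j (PySem.List.mem_pyRange_one.mpr hj'.1)
    · intro h i hi
      have hi' := PySem.List.mem_pyRange_one.mp hi
      have h0r : 0 ≤ i % k := Int.emod_nonneg i (by omega)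
      have hrk : i % k < k := Int.emod_lt_of_pos i hk
      have hr : (i % k) ∈ PySem.List.pyRange 0 k 1 := PySem.List.mem_pyRange_one.mpr ⟨h0r, hrk⟩
      have heq := h (i % k) hr
      rw [← map_g_strided n k arr (i % k) hk h0r hrk] at heq
      unfold pvCls at heq
      rw [List.map_inj_left] at heq
      exact heq i ((mem_strided n k (i % k) i hk h0r hrk hn).mpr ⟨hi', rfl⟩)
  have step1 := hpoint.trans step1' 
  -- step 2: sorted class equality ↔ permutation
  have step2 : ∀ r ∈ PySem.List.pyRange 0 k 1,
      (PySem.List.sorted (pvCls k arr n r) (fun x => x)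
          = pvCls k (PySem.List.sorted arr (fun x => x)) n r)
        ↔ (pvCls k arr n r).Perm (pvCls k (PySem.List.sorted arr (fun x => x)) n r) := by
    intro r hr
    have hmem := PySem.List.mem_pyRange_one.mp hr
    constructor
    · intro h
      have := PySem.List.sorted_perm (pvCls k arr n r) (fun x => x) false
      rw [h] at this
      exact this.symm
    · intro h
      exact PySem.List.sorted_id_eq_of_perm_of_pairwise _ _ h.symm
        (cls_sorted_pairwise n k r arr hk hmem.1 (by omega))
  -- step 3: permutation ↔ value counts, then pair counts
  rw [step1]
  constructor
  · intro h key
    obtain ⟨r, v⟩ := key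
    by_cases hb : 0 ≤ r ∧ r < k
    · rw [count_pair_eq n k arr r v hk hb.1 hb.2 hn,
          count_pair_eq n k _ r v hk hb.1 hb.2 hn]
      have hr : r ∈ PySem.List.pyRange 0 k 1 := PySem.List.mem_pyRange_one.mpr hb
      exact List.perm_iff_count.mp ((step2 r hr).mp (h r hr)) v
    · rw [count_pair_zero n k arr r v hk hb, count_pair_zero n k _ r v hk hb]
  · intro h r hr
    have hmem := PySem.List.mem_pyRange_one.mp hr
    refine (step2 r hr).mpr (List.perm_iff_count.mpr (fun v => ?_))
    rw [← count_pair_eq n k arr r v hk hmem.1 hmem.2 hn,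
        ← count_pair_eq n k _ r v hk hmem.1 hmem.2 hn]
    exact h (r, v)

-- B's result, characterised (0 < k, len = n)
lemma B_eq (n k : Int) (arr : List Int) (hk : 0 < k) (hlen : (arr.length : Int) = n) :
    is_lock_valid_alt n k arr =
      if (PySem.List.pyRange 0 n 1).map (pvG n k arr) = PySem.List.sorted arr (fun x => x)
      then "Yes" else "No" := by
  simp only [is_lock_valid_alt]
  rw [if_neg (by omega : ¬ ((arr.length : Int) ≠ n))]
  have hfold : ((PySem.List.pyRange 0 n 1).foldl
      (fun (d : PySem.Dict (Int × Int) Int) i =>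
        let r := PySem.Int.mod i k
        let d1 := d.insert (r, PySem.List.pyGetD arr i 0) (d.getD (r, PySem.List.pyGetD arr i 0) 0 + 1)
        d1.insert (r, PySem.List.pyGetD (PySem.List.sorted arr (fun x => x)) i 0)
          (d1.getD (r, PySem.List.pyGetD (PySem.List.sorted arr (fun x => x)) i 0) 0 - 1))
      PySem.Dict.empty)
      = (PySem.List.pyRange 0 n 1).foldl (pvStep k arr (PySem.List.sorted arr (fun x => x))) PySem.Dict.empty := rfl
  rw [hfold]
  set bal := (PySem.List.pyRange 0 n 1).foldl (pvStep k arr (PySem.List.sorted arr (fun x => x))) PySem.Dict.empty with hbal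
  have hall : (bal.values.all (fun v => v == 0)) = true
      ↔ ((PySem.List.pyRange 0 n 1).map (pvG n k arr) = PySem.List.sorted arr (fun x => x)) := by
    rw [all_values_zero bal (bal_nodup_keys _ _ _ _ _ PySem.Dict.nodup_keys_empty),
        yes_iff n k arr hk hlen]
    constructor
    · intro h key
      have := h key
      rw [hbal, bal_getD] at this
      simp only [PySem.Dict.getD_empty, zero_add] at this
      omega
    · intro h key
      rw [hbal, bal_getD]
      simp only [PySem.Dict.getD_empty, zero_add]
      rw [h key]
      omega
  by_cases hc : (PySem.List.pyRange 0 n 1).map (pvG n k arr) = PySem.List.sorted arr (fun x => x)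
  · rw [if_pos (hall.mpr hc), if_pos hc]
  · rw [if_neg (fun hb => hc (hall.mp hb)), if_neg hc]

-- ===== VERDICT (by name: the statement is the Claim_ definition above) =====
theorem is_lock_valid_spec : Claim_equal_is_lock_valid := by
  intro n k arr _ hPre
  unfold Spec_is_lock_valid
  by_cases hn : 0 < n
  · obtain ⟨hk, hle⟩ := hPre.1 hn
    by_cases hlen : (arr.length : Int) = n
    · rw [A_eq n k arr hk (le_of_lt hn), B_eq n k arr hk hlen]
    · -- n < length arr: both say "No"
      rw [A_eq n k arr hk (le_of_lt hn)]
      simp only [is_lock_valid_alt]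
      rw [if_pos (by omega : ((arr.length : Int) ≠ n)), if_neg]
      intro heq
      have h1 : ((PySem.List.pyRange 0 n 1).map (pvG n k arr)).length = n.toNat := by
        rw [List.length_map, PySem.List.length_pyRange_one]
        omega
      have h2 : (PySem.List.sorted arr (fun x => x)).length = arr.length :=
        PySem.List.length_sorted arr _ _
      rw [heq, h2] at h1
      omega
  · -- n ≤ 0
    have hn' : n ≤ 0 := by omega
    cases arr with
    | nil =>
      have hn0 : n = 0 := by
        rcases hPre with ⟨_, h2⟩
        by_contra h
        exact h2 ⟨by omega, rfl⟩
      subst hn0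
      have hnil : PySem.List.sorted ([] : List Int) (fun x => x) = [] := by
        have h := PySem.List.length_sorted ([] : List Int) (fun x => x) false
        simp only [List.length_nil] at h
        exact List.eq_nil_of_length_eq_zero h
      have hA : is_lock_valid 0 k [] = "Yes" := by
        simp only [is_lock_valid]
        rw [PySem.List.pyRange_one_eq_nil (le_refl (0:Int))]
        simp only [List.foldl_nil]
        rw [hnil, if_pos rfl]
      have hB : is_lock_valid_alt 0 k [] = "Yes" := by
        simp only [is_lock_valid_alt]
        rw [if_neg (by simp)]
        rw [PySem.List.pyRange_one_eq_nil (le_refl (0:Int))]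
        simp only [List.foldl_nil]
        rfl
      rw [hA, hB]
    | cons a l =>
      have hA : is_lock_valid n k (a :: l) = "No" := by
        simp only [is_lock_valid]
        rw [PySem.List.pyRange_one_eq_nil hn']
        simp only [List.foldl_nil]
        rw [if_neg]
        intro heq
        have h := PySem.List.length_sorted (a :: l) (fun x => x) false
        rw [← heq] at h
        simp at h
      have hB : is_lock_valid_alt n k (a :: l) = "No" := by
        simp only [is_lock_valid_alt]
        rw [if_pos (show (((a :: l).length : Int)) ≠ n by
          simp only [List.length_cons]
          push_cast
          omega)]
      rw [hA, hB]
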